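-- pv_equiv track=rewrite | github.com/brennan49/python_practice | practiceQuestions/problems1.py | getSubstringRepeat
-- ===== SOURCE A (Python) =====
-- def get_all_substrings(string, k):
--     substring = []
--     i = 0
--     while k <= len(string):
--         substring.append(string[i:k])
--         i = i + 1
--         k = k + 1
--     return substring
--
-- def getSubstringRepeat(string, k):
--     subList = get_all_substrings(string,k)
--     retList = []
--     for item in subList:
--         count = 0
--         repeatDict = {}
--         for char in item:
--                 if char in repeatDict:
--                     count = count + 1
--                 else:
--                     repeatDict[char] = None
--         repeatDict.clear()
--         if count == 1:
--             retList.append(item)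
--
--     return retList
-- ===== SOURCE B (Python) =====
-- def getSubstringRepeat(string, k):
--     # Sliding window: maintain char frequencies and a running count of
--     # duplicate occurrences, O(n) instead of O(n*k).
--     if k < 0:
--         return []
--     res = []
--     freq = {}
--     dups = 0
--     for i, c in enumerate(string):
--         freq[c] = freq.get(c, 0) + 1
--         if freq[c] >= 2:
--             dups += 1
--         if i >= k:
--             d = string[i - k]
--             if freq[d] >= 2:
--                 dups -= 1
--             freq[d] -= 1
--         if i >= k - 1 and dups == 1:
--             res.append(string[i - k + 1:i + 1])
--     return res
-- ===== Notes on version B (the rewrite author's own statement) =====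
-- stated objective: faster
-- what changed: Replaced enumerate-all-k-windows-then-recount-each (a fresh dict pass per window) by a single sliding-window pass that maintains an incremental character-frequency map and a running duplicate count.
-- outside the precondition, e.g. on getSubstringRepeat('aab', -1): A returns ['aa'], B returns []
import Mathlib
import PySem

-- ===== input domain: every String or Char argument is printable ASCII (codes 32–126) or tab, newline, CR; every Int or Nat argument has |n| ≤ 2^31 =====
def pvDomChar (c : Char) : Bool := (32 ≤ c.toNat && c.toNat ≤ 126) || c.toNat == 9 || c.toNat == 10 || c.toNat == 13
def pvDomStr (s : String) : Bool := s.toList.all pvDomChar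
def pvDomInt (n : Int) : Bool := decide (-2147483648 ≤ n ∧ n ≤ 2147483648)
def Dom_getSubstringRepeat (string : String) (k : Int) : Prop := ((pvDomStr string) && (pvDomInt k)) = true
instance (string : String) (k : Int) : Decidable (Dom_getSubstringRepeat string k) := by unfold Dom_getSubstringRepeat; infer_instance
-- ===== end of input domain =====

-- B replaces A's enumerate-every-k-window-and-recount scan by one sliding-window pass
-- with an incremental frequency map and a running duplicate count (objective: faster).


-- ===== PORT A =====
-- the while loop of get_all_substrings (i, k are Python ints)
def pvGasA (s : List Char) (i k : Int) : List (List Char) :=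
  if _h : k ≤ (s.length : Int) then
    PySem.List.slice s (some i) (some k) :: pvGasA s (i + 1) (k + 1)
  else []
termination_by ((s.length : Int) + 1 - k).toNat
decreasing_by omega

-- the inner 'for char in item' loop: (count, repeatDict) with repeatDict a set of seen chars
def pvCountA (item : List Char) : Int × PySem.Set Char :=
  item.foldl
    (fun st char => if st.2.contains char then (st.1 + 1, st.2) else (st.1, st.2.add char))
    (0, PySem.Set.ofList [])

def getSubstringRepeat (string : String) (k : Int) : List String :=
  let subList := pvGasA string.toList 0 k
  -- repeatDict.clear() mutates a local dict that is rebuilt next iteration: no effect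
  subList.foldl
    (fun retList item =>
      if (pvCountA item).1 == 1 then retList ++ [String.ofList item] else retList)
    []

-- ===== PORT B =====
-- one sliding-window step of Source B's loop body; state = (freq, dups, res), ic = (i, c)
def pvStepB (s : List Char) (k : Int) (st : PySem.Dict Char Int × Int × List String)
    (ic : Int × Char) : PySem.Dict Char Int × Int × List String :=
  let freq := st.1
  let dups := st.2.1
  let res := st.2.2
  let i := ic.1
  let c := ic.2
  let freq1 := freq.insert c (freq.getD c 0 + 1)
  let dups1 := if freq1.getD c 0 ≥ 2 then dups + 1 else dups
  let fd :=
    if i ≥ k then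
      -- Source B reads string[i-k]; 0 ≤ i-k ≤ i < len(s) on every call, so the default is never used
      let d := (PySem.List.pyGet? s (i - k)).getD c
      let dups2 := if freq1.getD d 0 ≥ 2 then dups1 - 1 else dups1
      (freq1.insert d (freq1.getD d 0 - 1), dups2)
    else (freq1, dups1)
  let res1 :=
    if i ≥ k - 1 ∧ fd.2 = 1 then
      res ++ [String.ofList (PySem.List.slice s (some (i - k + 1)) (some (i + 1)))]
    else res
  (fd.1, fd.2, res1)

def getSubstringRepeat_alt (string : String) (k : Int) : List String :=
  if k < 0 then []
  else
    ((PySem.List.enumerate string.toList 0).foldl (pvStepB string.toList k)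
      (PySem.Dict.mk [], 0, [])).2.2

-- ===== PRECONDITION & SPEC =====
-- Pre_ excludes k < 0, where A still returns: Python's negative slice bound wraps around
-- (string[0:k] = string[0:len+k]), so A can emit one shorter substring for a negative
-- requested length — an accident of slicing; B returns [] there.
def Pre_getSubstringRepeat (string : String) (k : Int) : Prop := 0 ≤ k
instance (string : String) (k : Int) : Decidable (Pre_getSubstringRepeat string k) := by
  unfold Pre_getSubstringRepeat; infer_instance

def pvWitness_getSubstringRepeat : String × Int := ("aabbcc", 2)

def Spec_getSubstringRepeat (string : String) (k : Int) (out : List String) : Prop :=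
  out = getSubstringRepeat_alt string k
instance (string : String) (k : Int) (out : List String) :
    Decidable (Spec_getSubstringRepeat string k out) := by
  unfold Spec_getSubstringRepeat; infer_instance

-- ===== CLAIM (what is proved, stated in full; the proofs are below) =====
def Claim_equal_getSubstringRepeat : Prop :=
  ∀ (string : String) (k : Int), Dom_getSubstringRepeat string k →
    Pre_getSubstringRepeat string k →
    Spec_getSubstringRepeat string k (getSubstringRepeat string k)

-- ===== LEMMAS AND PROOFS =====

-- window of the last min(j, kn) characters of the length-j prefix of s
def pvWin (s : List Char) (kn j : Nat) : List Char := (s.take j).drop (j - kn)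

-- number of duplicate occurrences (length minus number of distinct characters), as an Int
def pvDupI (w : List Char) : Int := (w.length : Int) - (w.toFinset.card : Int)

-- the window ending at position j, if it is full-length and has exactly one duplicate
def pvG (s : List Char) (kn j : Nat) : Option String :=
  if kn ≤ j ∧ pvDupI (pvWin s kn j) = 1 then some (String.ofList (pvWin s kn j)) else none

lemma pvDupI_append (w : List Char) (c : Char) :
    pvDupI (w ++ [c]) = pvDupI w + (if c ∈ w then 1 else 0) := by
  unfold pvDupI
  by_cases h : c ∈ w
  · have : (w ++ [c]).toFinset = w.toFinset := by simp [List.toFinset_append, h]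
    rw [this]; simp [h]; omega
  · have he : (w ++ [c]).toFinset = insert c w.toFinset := by ext x; simp
    rw [he, Finset.card_insert_of_notMem (by simpa using h)]
    simp [h]

lemma pvDupI_cons (d : Char) (w : List Char) :
    pvDupI (d :: w) = pvDupI w + (if d ∈ w then 1 else 0) := by
  unfold pvDupI
  by_cases h : d ∈ w
  · have : (d :: w).toFinset = w.toFinset := by simp [List.toFinset_cons, h]
    rw [this]; simp [h]; omega
  · rw [List.toFinset_cons, Finset.card_insert_of_notMem (by simpa using h)]
    simp [h]

lemma pvCountA_go (l : List Char) : ∀ (c0 : Int) (S : PySem.Set Char),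
    (l.foldl (fun st char => if st.2.contains char then (st.1 + 1, st.2) else (st.1, st.2.add char)) (c0, S)).1
      = c0 + (l.length : Int) - ((l.toFinset \ S.toFinset).card : Int) := by
  induction l with
  | nil => intro c0 S; simp
  | cons c l ih =>
    intro c0 S
    rw [List.foldl_cons]
    by_cases h : c ∈ S
    · have hc : (S : List Char).contains c = true := List.contains_iff_mem.mpr h
      simp only [hc, if_true]
      rw [ih]
      have : (c :: l).toFinset \ S.toFinset = l.toFinset \ S.toFinset := by
        rw [List.toFinset_cons]
        exact Finset.insert_sdiff_of_mem _ (by simpa using h)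
      rw [this]; simp only [List.length_cons]; push_cast; ring
    · have hc : (S : List Char).contains c = false := by
        simpa using h
      simp only [hc, Bool.false_eq_true, if_false]
      have hadd : PySem.Set.add S c = S ++ [c] := by
        simp [PySem.Set.add, h]
      rw [hadd, ih]
      have h1 : (S ++ [c]).toFinset = insert c S.toFinset := by ext x; simp
      have h2 : l.toFinset \ insert c S.toFinset = (l.toFinset \ S.toFinset).erase c :=
        Finset.sdiff_insert _ _ _
      have h3 : (c :: l).toFinset \ S.toFinset = insert c (l.toFinset \ S.toFinset) := by
        rw [List.toFinset_cons]
        ext x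
        by_cases hx : x = c
        · subst hx; simp [h]
        · simp [hx]
      have key : (insert c (l.toFinset \ S.toFinset)).card
          = ((l.toFinset \ S.toFinset).erase c).card + 1 := by
        by_cases hcy : c ∈ l.toFinset \ S.toFinset
        · rw [Finset.insert_eq_self.mpr hcy, Finset.card_erase_of_mem hcy]
          have : 0 < (l.toFinset \ S.toFinset).card := Finset.card_pos.mpr ⟨c, hcy⟩
          omega
        · rw [Finset.card_insert_of_notMem hcy, Finset.erase_eq_self.mpr hcy]
      rw [h1, h2, h3, key]; simp only [List.length_cons]; push_cast; ring

lemma pvCountA_eq (item : List Char) : (pvCountA item).1 = pvDupI item := by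
  unfold pvCountA
  rw [pvCountA_go]
  simp [pvDupI, PySem.Set.ofList]

lemma pvGasA_eq (s : List Char) (kn : Nat) : ∀ (t j : Nat), s.length + 1 - (j + kn) = t →
    pvGasA s (j : Int) ((j + kn : Nat) : Int)
      = (List.range' j (s.length + 1 - kn - j)).map (fun i => (s.drop i).take kn) := by
  intro t
  induction t with
  | zero =>
    intro j h
    rw [pvGasA, dif_neg (by push_cast; omega)]
    have hc : s.length + 1 - kn - j = 0 := by omega
    rw [hc]
    simp
  | succ t ih =>
    intro j h
    rw [pvGasA, dif_pos (by push_cast; omega)]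
    rw [PySem.List.slice_natCast]
    have h1 : ((j : Int) + 1) = ((j + 1 : Nat) : Int) := by push_cast; ring
    have h2 : (((j + kn : Nat) : Int) + 1) = (((j + 1) + kn : Nat) : Int) := by push_cast; ring
    rw [h1, h2, ih (j + 1) (by omega)]
    have hc : s.length + 1 - kn - j = (s.length + 1 - kn - (j + 1)) + 1 := by omega
    rw [hc, List.range'_succ, List.map_cons]
    congr 2
    omega

lemma pvStepB_spec (s : List Char) (k : Int) (hk : 0 ≤ k) (m : Nat) (hm : m < s.length)
    (freq : PySem.Dict Char Int) (res : List String)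
    (hfreq : ∀ e, freq.getD e 0 = ((pvWin s k.toNat m).count e : Int)) :
    ∃ freq', pvStepB s k (freq, pvDupI (pvWin s k.toNat m), res) ((m : Int), s[m]) =
        (freq', pvDupI (pvWin s k.toNat (m + 1)),
          res ++ (pvG s k.toNat (m + 1)).toList)
      ∧ ∀ e, freq'.getD e 0 = ((pvWin s k.toNat (m + 1)).count e : Int) := by
  have hkn : (k.toNat : Int) = k := Int.toNat_of_nonneg hk
  have htake : s.take (m+1) = s.take m ++ [s[m]] := by
    rw [List.take_add_one]; simp [List.getElem?_eq_getElem hm]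
  have hfreq1 : ∀ e, (freq.insert s[m] (freq.getD s[m] 0 + 1)).getD e 0
      = (((pvWin s k.toNat m) ++ [s[m]]).count e : Int) := by
    intro e
    rw [PySem.Dict.getD_insert]
    by_cases he : e = s[m]
    · subst he
      rw [if_pos rfl, hfreq]
      simp [List.count_append]
    · rw [if_neg he, hfreq]
      simp [List.count_append, List.count_eq_zero, he]
  have hmem1 : ((freq.insert s[m] (freq.getD s[m] 0 + 1)).getD s[m] 0 ≥ 2)
      ↔ s[m] ∈ pvWin s k.toNat m := by
    rw [hfreq1]
    have hcnt : ((pvWin s k.toNat m) ++ [s[m]]).count s[m]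
        = (pvWin s k.toNat m).count s[m] + 1 := by simp [List.count_append]
    rw [hcnt, ← List.count_pos_iff]
    push_cast
    omega
  have hdups1 : (if (freq.insert s[m] (freq.getD s[m] 0 + 1)).getD s[m] 0 ≥ 2
        then pvDupI (pvWin s k.toNat m) + 1 else pvDupI (pvWin s k.toNat m))
      = pvDupI ((pvWin s k.toNat m) ++ [s[m]]) := by
    rw [pvDupI_append]
    by_cases hmem : s[m] ∈ pvWin s k.toNat m
    · rw [if_pos (hmem1.mpr hmem), if_pos hmem]
    · rw [if_neg (fun hcon => hmem (hmem1.mp hcon)), if_neg hmem, add_zero]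
  unfold pvStepB
  dsimp only
  rw [hdups1]
  have hcond : ((m : Int) ≥ k - 1) ↔ k.toNat ≤ m + 1 := by omega
  by_cases hcase : k ≤ (m : Int)
  · -- the window is full: the leftmost character is dropped
    rw [if_pos (by omega : (m : Int) ≥ k)]
    have hmk : m - k.toNat < s.length := by omega
    have hd : (PySem.List.pyGet? s ((m : Int) - k)).getD s[m] = s[m - k.toNat]'hmk := by
      have he : (m : Int) - k = ((m - k.toNat : Nat) : Int) := by omega
      rw [he, PySem.List.pyGet?_natCast, List.getElem?_eq_getElem hmk]
      rfl
    have hsplit : pvWin s k.toNat m ++ [s[m]]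
        = s[m - k.toNat]'hmk :: pvWin s k.toNat (m + 1) := by
      have h1 : (s.take (m + 1)).drop (m - k.toNat)
          = (s.take m).drop (m - k.toNat) ++ [s[m]] := by
        rw [htake, List.drop_append_of_le_length (by simp; omega)]
      have hlen : m - k.toNat < (s.take (m + 1)).length := by simp; omega
      have h2 := List.drop_eq_getElem_cons hlen
      rw [List.getElem_take] at h2
      unfold pvWin
      rw [← h1, h2]
      congr 2
      omega
    simp only [hd, hfreq1, hsplit]
    have hdups2 : (if ((s[m - k.toNat]'hmk :: pvWin s k.toNat (m + 1)).count (s[m - k.toNat]'hmk) : Int) ≥ 2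
          then pvDupI (s[m - k.toNat]'hmk :: pvWin s k.toNat (m + 1)) - 1
          else pvDupI (s[m - k.toNat]'hmk :: pvWin s k.toNat (m + 1)))
        = pvDupI (pvWin s k.toNat (m + 1)) := by
      rw [pvDupI_cons]
      have hcnt : (s[m - k.toNat]'hmk :: pvWin s k.toNat (m + 1)).count (s[m - k.toNat]'hmk)
          = (pvWin s k.toNat (m + 1)).count (s[m - k.toNat]'hmk) + 1 := by
        simp [List.count_cons]
      rw [hcnt]
      by_cases hdw : s[m - k.toNat]'hmk ∈ pvWin s k.toNat (m + 1)
      · rw [if_pos hdw, if_pos (by have := List.count_pos_iff.mpr hdw; push_cast; omega)]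
        ring
      · rw [if_neg hdw, if_neg (by have := List.count_eq_zero.mpr hdw; push_cast; omega)]
        ring
    rw [hdups2]
    refine ⟨(freq.insert s[m] (freq.getD s[m] 0 + 1)).insert (s[m - k.toNat]'hmk)
      ((List.count (s[m - k.toNat]'hmk) (s[m - k.toNat]'hmk :: pvWin s k.toNat (m + 1)) : Int) - 1),
      ?_, ?_⟩
    · -- the returned triple
      refine Prod.ext rfl (Prod.ext rfl ?_)
      unfold pvG
      simp only [hcond]
      by_cases hP : k.toNat ≤ m + 1 ∧ pvDupI (pvWin s k.toNat (m + 1)) = 1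
      · rw [if_pos hP, if_pos hP]
        have e1 : (m : Int) - k + 1 = ((m + 1 - k.toNat : Nat) : Int) := by omega
        have e2 : (m : Int) + 1 = ((m + 1 : Nat) : Int) := by push_cast; ring
        rw [e1, e2, PySem.List.slice_natCast]
        unfold pvWin
        rw [List.drop_take]
        rfl
      · rw [if_neg hP, if_neg hP]
        simp
    · -- the frequency map after the two inserts
      intro e
      rw [PySem.Dict.getD_insert]
      by_cases he : e = s[m - k.toNat]'hmk
      · rw [if_pos he, he]
        have : (s[m - k.toNat]'hmk :: pvWin s k.toNat (m + 1)).count (s[m - k.toNat]'hmk)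
            = (pvWin s k.toNat (m + 1)).count (s[m - k.toNat]'hmk) + 1 := by
          simp [List.count_cons]
        rw [this]
        push_cast
        ring
      · rw [if_neg he, hfreq1, hsplit]
        simp [List.count_cons, Ne.symm he]
  · -- the window is still growing: nothing is dropped
    rw [if_neg (by omega : ¬ ((m : Int) ≥ k))]
    have hwin : pvWin s k.toNat (m + 1) = pvWin s k.toNat m ++ [s[m]] := by
      unfold pvWin
      have h0 : m - k.toNat = 0 := by omega
      have h1 : m + 1 - k.toNat = 0 := by omega
      rw [htake, h0, h1]
      simp
    rw [← hwin]
    refine ⟨freq.insert s[m] (freq.getD s[m] 0 + 1), ?_, ?_⟩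
    · refine Prod.ext rfl (Prod.ext rfl ?_)
      unfold pvG
      simp only [hcond]
      by_cases hP : k.toNat ≤ m + 1 ∧ pvDupI (pvWin s k.toNat (m + 1)) = 1
      · rw [if_pos hP, if_pos hP]
        have e1 : (m : Int) - k + 1 = ((m + 1 - k.toNat : Nat) : Int) := by omega
        have e2 : (m : Int) + 1 = ((m + 1 : Nat) : Int) := by push_cast; ring
        rw [e1, e2, PySem.List.slice_natCast]
        unfold pvWin
        rw [List.drop_take]
        rfl
      · rw [if_neg hP, if_neg hP]
        simp
    · intro e
      rw [hwin]
      exact hfreq1 e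

lemma pvRunB (s : List Char) (k : Int) (hk : 0 ≤ k) : ∀ (t m : Nat), s.length - m = t →
    m ≤ s.length → ∀ (freq : PySem.Dict Char Int) (res : List String),
    (∀ e, freq.getD e 0 = ((pvWin s k.toNat m).count e : Int)) →
    ((PySem.List.enumerate (s.drop m) (m : Int)).foldl (pvStepB s k)
        (freq, pvDupI (pvWin s k.toNat m), res)).2.2
      = res ++ (List.range' (m + 1) (s.length - m)).filterMap (pvG s k.toNat) := by
  intro t
  induction t with
  | zero =>
    intro m h hle freq res hfreq
    have hm : m = s.length := by omega
    subst hm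
    simp [PySem.List.enumerate]
  | succ t ih =>
    intro m h hle freq res hfreq
    have hm : m < s.length := by omega
    have hdrop : s.drop m = s[m] :: s.drop (m + 1) := List.drop_eq_getElem_cons hm
    rw [hdrop]
    have henum : PySem.List.enumerate (s[m] :: s.drop (m + 1)) (m : Int)
        = ((m : Int), s[m]) :: PySem.List.enumerate (s.drop (m + 1)) ((m : Int) + 1) := rfl
    rw [henum, List.foldl_cons]
    obtain ⟨freq', heq, hfreq'⟩ := pvStepB_spec s k hk m hm freq res hfreq
    rw [heq]
    have hcast : ((m : Int) + 1) = ((m + 1 : Nat) : Int) := by push_cast; ring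
    rw [hcast, ih (m + 1) (by omega) (by omega) freq' _ hfreq']
    have hr : List.range' (m + 1) (s.length - m)
        = (m + 1) :: List.range' (m + 2) (s.length - (m + 1)) := by
      have hc : s.length - m = (s.length - (m + 1)) + 1 := by omega
      rw [hc, List.range'_succ]
    rw [hr, List.filterMap_cons]
    cases hg : pvG s k.toNat (m + 1) <;> simp

lemma pvRanges (s : List Char) (kn : Nat) :
    (List.range' 1 s.length).filterMap (pvG s kn)
      = (List.range' kn (s.length + 1 - kn)).filterMap (pvG s kn) := by
  by_cases h0 : kn = 0
  · subst h0
    rw [Nat.sub_zero, List.range'_succ, List.filterMap_cons]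
    have hnone : pvG s 0 0 = none := by simp [pvG, pvWin, pvDupI]
    rw [hnone]
  · by_cases hn : kn ≤ s.length
    · have hsplit : List.range' 1 (kn - 1) ++ List.range' kn (s.length + 1 - kn)
          = List.range' 1 s.length := by
        have h := List.range'_append (s := 1) (m := kn - 1) (n := s.length + 1 - kn) (step := 1)
        have e1 : 1 + 1 * (kn - 1) = kn := by omega
        have e2 : (kn - 1) + (s.length + 1 - kn) = s.length := by omega
        rw [e1, e2] at h
        exact h
      rw [← hsplit, List.filterMap_append]
      have hnil : (List.range' 1 (kn - 1)).filterMap (pvG s kn) = [] := by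
        rw [List.filterMap_eq_nil_iff]
        intro a ha
        have hlt : a < kn := by
          have := List.mem_range'_1.mp ha
          omega
        unfold pvG
        rw [if_neg (fun hcon => by omega)]
      rw [hnil, List.nil_append]
    · have h1 : s.length + 1 - kn = 0 := by omega
      rw [h1, List.range'_zero]
      simp only [List.filterMap_nil]
      rw [List.filterMap_eq_nil_iff]
      intro a ha
      have hlt : a < kn := by
        have := List.mem_range'_1.mp ha
        omega
      unfold pvG
      rw [if_neg (fun hcon => by omega)]

-- filterMap of an if-some-none function is map-after-filter
lemma pvFilterMapIf (p : Nat → Bool) (f : Nat → String) (l : List Nat) :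
    l.filterMap (fun x => if p x then some (f x) else none) = (l.filter p).map f := by
  induction l with
  | nil => rfl
  | cons a l ih =>
    rw [List.filterMap_cons, List.filter_cons]
    cases hp : p a <;> simp [ih]

-- A's window list with the per-window recount equals B's filterMap form
lemma pvAB (s : List Char) (kn : Nat) :
    ((List.range (s.length + 1 - kn)).map (fun i => (s.drop i).take kn)).foldl
      (fun retList item => if (pvCountA item).1 == 1 then retList ++ [String.ofList item] else retList) []
    = (List.range' kn (s.length + 1 - kn)).filterMap (pvG s kn) := by
  rw [PySem.List.foldl_append_if, List.nil_append, List.filter_map, List.map_map,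
      List.range'_eq_map_range, List.filterMap_map,
      ← pvFilterMapIf ((fun item => (pvCountA item).1 == 1) ∘ (fun i => (s.drop i).take kn))
        (String.ofList ∘ (fun i => (s.drop i).take kn))]
  congr 1
  funext i
  have hwin : pvWin s kn (kn + i) = (s.drop i).take kn := by
    unfold pvWin
    have h1 : kn + i - kn = i := by omega
    rw [h1, List.drop_take]
    congr 1
    omega
  simp only [Function.comp, pvG, hwin, pvCountA_eq, Nat.le_add_right, true_and]
  by_cases hq : pvDupI ((s.drop i).take kn) = 1
  · simp [hq]
  · simp [hq]

-- ===== VERDICT (by name: the statement is the Claim_ definition above) =====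
theorem getSubstringRepeat_spec : Claim_equal_getSubstringRepeat := by
  unfold Claim_equal_getSubstringRepeat
  intro str k _hdom hpre
  unfold Pre_getSubstringRepeat at hpre
  unfold Spec_getSubstringRepeat getSubstringRepeat getSubstringRepeat_alt
  rw [if_neg (by omega : ¬ k < 0)]
  dsimp only
  -- B's fold = the filterMap over all window end positions
  have hinit : ∀ e : Char, (PySem.Dict.mk [] : PySem.Dict Char Int).getD e 0
      = ((pvWin str.toList k.toNat 0).count e : Int) := by
    intro e
    have hw0 : pvWin str.toList k.toNat 0 = [] := by simp [pvWin]
    rw [hw0]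
    rfl
  have hdup0 : pvDupI (pvWin str.toList k.toNat 0) = 0 := by simp [pvWin, pvDupI]
  have hrun := pvRunB str.toList k hpre str.toList.length 0 rfl (by omega)
    (PySem.Dict.mk []) [] hinit
  rw [hdup0] at hrun
  simp only [List.drop_zero, Nat.cast_zero, Nat.sub_zero, List.nil_append] at hrun
  rw [hrun, pvRanges]
  -- A's while loop = the mapped range of windows
  have hkn : (k.toNat : Int) = k := Int.toNat_of_nonneg hpre
  have hgas : pvGasA str.toList 0 k
      = (List.range' 0 (str.toList.length + 1 - k.toNat)).map
          (fun i => (str.toList.drop i).take k.toNat) := by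
    have h := pvGasA_eq str.toList k.toNat (str.toList.length + 1 - (0 + k.toNat)) 0 rfl
    simp only [Nat.cast_zero, zero_add, hkn, Nat.sub_zero] at h
    exact h
  rw [hgas, ← List.range_eq_range']
  exact pvAB str.toList k.toNat
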